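-- pv_equiv track=rewrite | github.com/Zlata-zal/All__chapters | chapter_10/transform_strings.py | transform_strings
-- ===== SOURCE A (Python) =====
-- def transform_strings(strings):
--     L = len(strings)
--     N = len(strings[0])
--     result = ""
--
--     for i in range(N):
--         total = 0
--         for string in strings:
--             char = string[i]
--             if char == " ":
--                 total += 0
--             else:
--                 total += ord(char) - ord("a") + 1
--         avg = total // L
--         if avg == 0:
--             result += " "
--         else:
--             result += chr(avg + ord("a") - 1)
--     return result
-- ===== SOURCE B (Python) =====
-- def transform_strings(strings):
--     L = len(strings)
--     N = len(strings[0])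
--     totals = [0] * N
--     for string in strings:
--         totals = [t + (0 if string[i] == " " else ord(string[i]) - ord("a") + 1)
--                   for t, i in zip(totals, range(N))]
--     out = []
--     for t in totals:
--         avg = t // L
--         out.append(" " if avg == 0 else chr(avg + ord("a") - 1))
--     return "".join(out)
-- ===== Notes on version B (the rewrite author's own statement) =====
-- stated objective: alternative
-- what changed: B replaces A's column-major double scan (rescanning every string for each index) by a row-major single pass that maintains a totals accumulator list updated per string, followed by a separate emit pass joining the pieces.
import Mathlib
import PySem

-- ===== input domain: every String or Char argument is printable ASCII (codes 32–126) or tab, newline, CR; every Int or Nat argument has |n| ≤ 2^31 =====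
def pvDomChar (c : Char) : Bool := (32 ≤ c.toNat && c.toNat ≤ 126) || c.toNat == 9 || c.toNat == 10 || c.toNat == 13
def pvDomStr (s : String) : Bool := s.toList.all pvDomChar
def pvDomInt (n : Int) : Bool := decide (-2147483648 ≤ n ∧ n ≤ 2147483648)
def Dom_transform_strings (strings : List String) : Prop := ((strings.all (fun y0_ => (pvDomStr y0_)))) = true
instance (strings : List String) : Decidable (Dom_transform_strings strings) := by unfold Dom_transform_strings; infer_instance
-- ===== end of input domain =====

-- B re-decomposes A's column-major double scan into a row-major single pass over the
-- strings maintaining a totals accumulator, plus a separate emit pass; same cost ("alternative").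

-- ===== PORT A =====
-- column-major: for each index i, rescan all strings summing contributions, emit one char
def transform_strings (strings : List String) : String :=
  let L : Int := strings.length
  let N : Nat := ((strings.head?.getD "").toList).length
  (List.range N).foldl (fun (result : String) (i : Nat) =>
    let total : Int := strings.foldl (fun total s =>
      let char := (PySem.List.pyGet? s.toList (i : Int)).getD ' '
      if char = ' ' then total + 0 else total + ((char.toNat : Int) - 97 + 1)) 0
    let avg := PySem.Int.floordiv total L
    if avg = 0 then result ++ " "
    else result ++ String.ofList [Char.ofNat (avg + 96).toNat]) ""

-- ===== PORT B =====
-- contribution of character i of string s (0 for space, else ord - ord('a') + 1)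
def pvContrib (s : String) (i : Nat) : Int :=
  let char := (PySem.List.pyGet? s.toList (i : Int)).getD ' '
  if char = ' ' then 0 else (char.toNat : Int) - 97 + 1

-- row-major: one pass over the strings updating a totals list, then an emit pass joined at the end
def transform_strings_alt (strings : List String) : String :=
  let L : Int := strings.length
  let N : Nat := ((strings.head?.getD "").toList).length
  let totals : List Int := strings.foldl (fun totals s =>
      (totals.zip (List.range N)).map (fun p => p.1 + pvContrib s p.2))
    (List.replicate N (0 : Int))
  String.join (totals.map (fun t =>
    let avg := PySem.Int.floordiv t L
    if avg = 0 then " " else String.ofList [Char.ofNat (avg + 96).toNat]))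

-- ===== PRECONDITION & SPEC =====
-- Pre_ excludes exactly the inputs where Python A raises IndexError: the empty list
-- (strings[0]) and lists whose first string is longer than some other string (string[i]).
def Pre_transform_strings (strings : List String) : Prop :=
  strings ≠ [] ∧ ∀ s ∈ strings, ((strings.head?.getD "").toList).length ≤ s.toList.length
instance (strings : List String) : Decidable (Pre_transform_strings strings) := by
  unfold Pre_transform_strings; infer_instance
def pvWitness_transform_strings : List String := ["abc", "cde"]

def Spec_transform_strings (strings : List String) (out : String) : Prop := out = transform_strings_alt strings
instance (strings : List String) (out : String) : Decidable (Spec_transform_strings strings out) := by unfold Spec_transform_strings; infer_instance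

-- ===== CLAIM (what is proved, stated in full; the proofs are below) =====
def Claim_equal_transform_strings : Prop := ∀ (strings : List String), Dom_transform_strings strings → Pre_transform_strings strings → Spec_transform_strings strings (transform_strings strings)

-- ===== LEMMAS AND PROOFS =====

-- column sum as a mathematical value
def pvColSum (strings : List String) (i : Nat) : Int := (strings.map (fun s => pvContrib s i)).sum

-- emitted piece for a column total
def pvEmit (L t : Int) : String :=
  if PySem.Int.floordiv t L = 0 then " " else String.ofList [Char.ofNat (PySem.Int.floordiv t L + 96).toNat]

theorem str_foldl_shift (xs : List String) : ∀ (a : String), xs.foldl (· ++ ·) a = a ++ xs.foldl (· ++ ·) "" := by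
  induction xs with
  | nil => intro a; simp
  | cons x xs ih => intro a; simp only [List.foldl_cons]; rw [ih (a ++ x), ih ("" ++ x)]; simp [String.append_assoc]

theorem join_cons (x : String) (xs : List String) : String.join (x :: xs) = x ++ String.join xs := by
  simp only [String.join, List.foldl_cons]; rw [str_foldl_shift]; simp

-- folding "append an emitted piece" equals joining the mapped pieces
theorem foldl_append_join (g : Nat → String) (l : List Nat) : ∀ (acc : String),
    l.foldl (fun r i => r ++ g i) acc = acc ++ String.join (l.map g) := by
  induction l with
  | nil => intro acc; simp [String.join]
  | cons i rest ih =>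
      intro acc
      simp only [List.foldl_cons, List.map_cons, join_cons, ih]
      rw [String.append_assoc]

-- A's inner fold computes the column sum
theorem a_inner_eq_colSum (strings : List String) (i : Nat) (a : Int) :
    strings.foldl (fun total s =>
      let char := (PySem.List.pyGet? s.toList (i : Int)).getD ' '
      if char = ' ' then total + 0 else total + ((char.toNat : Int) - 97 + 1)) a
    = a + pvColSum strings i := by
  induction strings generalizing a with
  | nil => simp [pvColSum]
  | cons s rest ih =>
      simp only [List.foldl_cons, ih, pvColSum, List.map_cons, List.sum_cons, pvContrib]
      split_ifs <;> ring

-- A equals the join of the emitted column pieces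
theorem a_eq_join (strings : List String) :
    transform_strings strings
    = String.join ((List.range ((strings.head?.getD "").toList).length).map
        (fun i => pvEmit (strings.length : Int) (pvColSum strings i))) := by
  unfold transform_strings
  simp only [a_inner_eq_colSum, zero_add]
  have hpull : ∀ (r : String) (i : Nat),
      (if PySem.Int.floordiv (pvColSum strings i) ((strings.length : Nat) : Int) = 0 then r ++ " "
       else r ++ String.ofList [Char.ofNat (PySem.Int.floordiv (pvColSum strings i) ((strings.length : Nat) : Int) + 96).toNat])
      = r ++ pvEmit (strings.length : Int) (pvColSum strings i) := by
    intro r i; unfold pvEmit; split_ifs <;> rfl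
  simp only [hpull]
  rw [foldl_append_join]
  simp

-- B's totals fold produces the column sums, index by index
theorem b_totals_eq (strings : List String) (N : Nat) (f : Nat → Int) :
    strings.foldl (fun totals s =>
      (totals.zip (List.range N)).map (fun p => p.1 + pvContrib s p.2))
      ((List.range N).map f)
    = (List.range N).map (fun i => f i + pvColSum strings i) := by
  induction strings generalizing f with
  | nil => simp [pvColSum]
  | cons s rest ih =>
      simp only [List.foldl_cons]
      have hzip : ((List.range N).map f).zip (List.range N)
          = (List.range N).map (fun i => (f i, i)) := by
        simpa using List.zip_map' (f := f) (g := id) (l := List.range N)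
      rw [hzip, List.map_map]
      have h1 : ((fun p : Int × Nat => p.1 + pvContrib s p.2) ∘ fun i => (f i, i))
          = fun i => f i + pvContrib s i := rfl
      rw [h1, ih]
      have h2 : (fun i => (f i + pvContrib s i) + pvColSum rest i)
          = fun i => f i + pvColSum (s :: rest) i := by
        funext i; simp [pvColSum]; ring
      rw [h2]

-- B equals the same join
theorem b_eq_join (strings : List String) :
    transform_strings_alt strings
    = String.join ((List.range ((strings.head?.getD "").toList).length).map
        (fun i => pvEmit (strings.length : Int) (pvColSum strings i))) := by
  simp only [transform_strings_alt]
  have hrep : List.replicate ((strings.head?.getD "").toList).length (0 : Int)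
      = (List.range ((strings.head?.getD "").toList).length).map (fun _ => (0 : Int)) := by
    simp
  rw [hrep, b_totals_eq, List.map_map]
  congr 1
  apply List.map_congr_left
  intro i _
  simp [pvEmit, Function.comp]

-- ===== VERDICT (by name: the statement is the Claim_ definition above) =====
theorem transform_strings_spec : Claim_equal_transform_strings := by
  intro strings _ _
  unfold Spec_transform_strings
  rw [a_eq_join, b_eq_join]
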